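-- pv_equiv track=rewrite | github.com/Markodin01/FlowGuard | ml/RL_DQN.py | state_to_index
-- ===== SOURCE A (Python) =====
-- def state_to_index(state):
--     """
--     Convert the system's state into a unique index for accessing the Q-table.
--
--     This function combines both valve states and discretized tank levels into a single index,
--     which can be used to reference a specific row in the Q-table where corresponding Q-values are stored.
--
--     Args:
--         state (list): The current state of the environment consisting of valve states and tank levels.
--
--     Returns:
--         int: A unique index representing the given state in the Q-table.
--     """
--     valve_states = state[:4]  # Assuming first four entries are valve states
--     alarm_states = state[4:]  # Remaining entries are tank levels
--
--     # Combine valve states and discretized tank levels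
--     full_state = valve_states + alarm_states
--
--     # Calculate the cumulative index for the Q-table
--     base_sizes = [2] * len(valve_states) + [3] * len(alarm_states)
--     index = 0
--     for state_value, base in zip(reversed(full_state), reversed(base_sizes)):
--         index = index * base + state_value
--
--     return index
-- ===== SOURCE B (Python) =====
-- def state_to_index(state):
--     def encode(values, base):
--         # little-endian positional encoding; also returns base**len(values)
--         total, mult = 0, 1
--         for v in values:
--             total += v * mult
--             mult *= base
--         return total, mult
--
--     head_val, head_mult = encode(state[:4], 2)
--     tail_val, _ = encode(state[4:], 3)
--     return head_val + head_mult * tail_val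
-- ===== Notes on version B (the rewrite author's own statement) =====
-- stated objective: alternative
-- what changed: Replaces A's single reversed Horner fold over a zipped base_sizes list with two independent recursive little-endian encoders (base 2 on the valve prefix, base 3 on the alarm suffix) whose results are combined by one 2^len(prefix) shift; no base list, no zip, no reversal.
import Mathlib
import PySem

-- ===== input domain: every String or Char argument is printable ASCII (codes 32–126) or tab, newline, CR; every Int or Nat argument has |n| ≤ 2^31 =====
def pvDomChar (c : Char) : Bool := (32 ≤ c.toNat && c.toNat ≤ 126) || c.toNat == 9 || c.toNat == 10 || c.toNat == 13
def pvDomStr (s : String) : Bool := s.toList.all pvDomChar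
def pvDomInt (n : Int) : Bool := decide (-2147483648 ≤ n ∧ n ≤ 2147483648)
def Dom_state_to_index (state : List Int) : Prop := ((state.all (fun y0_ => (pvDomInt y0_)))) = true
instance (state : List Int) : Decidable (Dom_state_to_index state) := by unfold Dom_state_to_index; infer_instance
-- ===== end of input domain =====

-- B: instead of A's reversed Horner fold over a zipped base_sizes list, B little-endian-
-- encodes the valve prefix in base 2 and the alarm suffix in base 3 by two independent
-- forward passes and combines them with one multiplier (alternative decomposition, same O(n) cost).
-- ===== PORT A =====
def state_to_index (state : List Int) : Int :=
  let valve_states := PySem.List.slice state none (some 4)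
  let alarm_states := PySem.List.slice state (some 4) none
  let full_state := valve_states ++ alarm_states
  let base_sizes := List.replicate valve_states.length (2 : Int) ++ List.replicate alarm_states.length (3 : Int)
  (List.zip full_state.reverse base_sizes.reverse).foldl
    (fun index vb => index * vb.2 + vb.1) 0

-- ===== PORT B =====
-- Source B's helper 'encode': forward pass keeping (running total, running multiplier)
def encodePass (values : List Int) (base : Int) : Int × Int :=
  values.foldl (fun tm v => (tm.1 + v * tm.2, tm.2 * base)) (0, 1)

def state_to_index_alt (state : List Int) : Int :=
  let hp := encodePass (PySem.List.slice state none (some 4)) 2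
  let tp := encodePass (PySem.List.slice state (some 4) none) 3
  hp.1 + hp.2 * tp.1

-- ===== PRECONDITION & SPEC =====
def Spec_state_to_index (state : List Int) (out : Int) : Prop := out = state_to_index_alt state
instance (state : List Int) (out : Int) : Decidable (Spec_state_to_index state out) := by unfold Spec_state_to_index; infer_instance

-- ===== CLAIM =====
def Claim_equal_state_to_index : Prop := ∀ (state : List Int), Dom_state_to_index state → Spec_state_to_index state (state_to_index state)

-- ===== LEMMAS AND PROOFS =====

theorem zip_rev (a b : List Int) (h : a.length = b.length) :
    a.reverse.zip b.reverse = (a.zip b).reverse := by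
  induction a generalizing b with
  | nil => simp
  | cons x xs ih =>
    cases b with
    | nil => simp at h
    | cons y ys =>
      simp only [List.length_cons, Nat.add_right_cancel_iff] at h
      simp only [List.reverse_cons, List.zip_cons_cons]
      rw [List.zip_append (by simp [h]), ih ys h]
      simp

-- little-endian value, recursion on the list (proof-only helper)
def encodeBase (base : Int) : List Int → Int
  | [] => 0
  | v :: vs => v + base * encodeBase base vs

-- B's forward pass from any accumulator, characterised by encodeBase
theorem encodePass_fold (b : Int) (l : List Int) (t m : Int) :
    l.foldl (fun tm v => (tm.1 + v * tm.2, tm.2 * b)) (t, m)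
      = (t + m * encodeBase b l, m * b ^ l.length) := by
  induction l generalizing t m with
  | nil => simp [encodeBase]
  | cons v vs ih =>
    simp only [List.foldl_cons, ih, encodeBase, List.length_cons, pow_succ, Prod.mk.injEq]
    constructor <;> ring

-- Horner foldr over a constant-base zip equals the recursive encoder plus a shifted accumulator
theorem foldr_horner_const (b : Int) (l : List Int) (acc : Int) :
    List.foldr (fun vb idx => idx * vb.2 + vb.1) acc (l.zip (List.replicate l.length b))
      = encodeBase b l + b ^ l.length * acc := by
  induction l with
  | nil => simp [encodeBase]
  | cons v vs ih =>
    simp only [List.length_cons, List.replicate_succ, List.zip_cons_cons, List.foldr_cons, ih,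
      encodeBase, pow_succ]
    ring

-- ===== VERDICT =====
theorem state_to_index_spec : Claim_equal_state_to_index := by
  intro state _
  unfold Spec_state_to_index state_to_index state_to_index_alt
  rw [show PySem.List.slice state none (some 4) = state.take 4 by
        simpa using PySem.List.slice_to_natCast state 4,
      show PySem.List.slice state (some 4) none = state.drop 4 by
        simpa using PySem.List.slice_from_natCast state 4]
  dsimp only
  have hlen : (state.take 4 ++ state.drop 4).length =
      (List.replicate (state.take 4).length (2:Int) ++ List.replicate (state.drop 4).length (3:Int)).length := by
    simp; omega
  rw [zip_rev _ _ hlen, List.foldl_reverse]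
  rw [List.zip_append (by simp)]
  rw [List.foldr_append, foldr_horner_const, foldr_horner_const]
  unfold encodePass
  rw [encodePass_fold, encodePass_fold]
  ring
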